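-- pv_equiv track=rewrite | github.com/killerxzol/sentiment-distribution | utils/utils.py | _pos_populate
-- ===== SOURCE A (Python) =====
-- def _pos_populate(pos_texts):
--     population = dict()
--     for text in pos_texts:
--         for pair in text:
--             word, pos = pair
--             if word not in population:
--                 population[word] = dict()
--             population[word][pos] = population[word].get(pos, 0) + 1
--     return population
-- ===== SOURCE B (Python) =====
-- def _pos_populate(pos_texts):
--     # Phase 1: one flat pass building a single counter keyed by (word, pos).
--     pairs = [pair for text in pos_texts for pair in text]
--     counts = {}
--     for pair in pairs:
--         counts[pair] = counts.get(pair, 0) + 1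
--     # Phase 2: reshape the flat counter into the nested word -> pos -> count dict.
--     population = {}
--     for (word, pos), count in counts.items():
--         inner = population.setdefault(word, {})
--         inner[pos] = count
--     return population
-- ===== Notes on version B (the rewrite author's own statement) =====
-- stated objective: alternative
-- what changed: A builds the nested word->pos count dict incrementally inside one nested loop; B first makes a single flat pass building one counter keyed by the (word,pos) pair, then a second pass over that counter's items reshapes it into the nested dict via setdefault.
import Mathlib
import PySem

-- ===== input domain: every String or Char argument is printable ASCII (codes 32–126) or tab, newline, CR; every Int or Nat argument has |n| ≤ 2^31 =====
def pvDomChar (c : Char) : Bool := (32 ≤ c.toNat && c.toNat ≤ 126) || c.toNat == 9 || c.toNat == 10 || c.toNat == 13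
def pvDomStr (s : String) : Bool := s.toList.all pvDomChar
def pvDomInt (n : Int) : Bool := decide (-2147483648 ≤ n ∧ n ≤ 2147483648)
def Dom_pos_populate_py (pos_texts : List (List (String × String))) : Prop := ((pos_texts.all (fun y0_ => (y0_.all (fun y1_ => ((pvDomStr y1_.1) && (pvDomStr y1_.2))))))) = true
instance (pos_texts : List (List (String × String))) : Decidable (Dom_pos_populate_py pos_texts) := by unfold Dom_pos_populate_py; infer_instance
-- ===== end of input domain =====

-- B replaces A's single nested incremental-count loop by two phases: a flat (word,pos) counter
-- built in one pass, then a reshape pass over the counter's items (objective: alternative).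

-- ===== PORT A =====
-- body of A's inner 'for pair in text' loop
def pos_populate_step (population : PySem.Dict String (PySem.Dict String Int))
    (pair : String × String) : PySem.Dict String (PySem.Dict String Int) :=
  let word := pair.1
  let pos := pair.2
  let population :=
    if population.contains word then population else population.insert word PySem.Dict.empty
  let inner := population.getD word PySem.Dict.empty
  population.insert word (inner.insert pos (inner.getD pos 0 + 1))

def pos_populate_py (pos_texts : List (List (String × String))) : List (String × List (String × Int)) :=
  let population :=
    pos_texts.foldl (fun population text => text.foldl pos_populate_step population)
      PySem.Dict.empty
  population.items.map (fun e => (e.1, e.2.items))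

-- ===== PORT B =====
-- phase-1 loop body: counts[pair] = counts.get(pair, 0) + 1
def pos_count_step (counts : PySem.Dict (String × String) Int)
    (pair : String × String) : PySem.Dict (String × String) Int :=
  counts.insert pair (counts.getD pair 0 + 1)

-- phase-2 loop body: inner = population.setdefault(word, {}); inner[pos] = count
def pos_reshape_step (population : PySem.Dict String (PySem.Dict String Int))
    (item : (String × String) × Int) : PySem.Dict String (PySem.Dict String Int) :=
  let population := population.setdefault item.1.1 PySem.Dict.empty
  let inner := population.getD item.1.1 PySem.Dict.empty
  population.insert item.1.1 (inner.insert item.1.2 item.2)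

def pos_populate_py_alt (pos_texts : List (List (String × String))) : List (String × List (String × Int)) :=
  let pairs := pos_texts.flatMap (fun text => text)
  let counts := pairs.foldl pos_count_step PySem.Dict.empty
  let population := counts.items.foldl pos_reshape_step PySem.Dict.empty
  population.items.map (fun e => (e.1, e.2.items))

-- ===== PRECONDITION & SPEC =====
def Spec_pos_populate_py (pos_texts : List (List (String × String))) (out : List (String × List (String × Int))) : Prop := out = pos_populate_py_alt pos_texts
instance (pos_texts : List (List (String × String))) (out : List (String × List (String × Int))) : Decidable (Spec_pos_populate_py pos_texts out) := by unfold Spec_pos_populate_py; infer_instance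

-- ===== CLAIM (what is proved, stated in full; the proofs are below) =====
def Claim_equal_pos_populate_py : Prop := ∀ (pos_texts : List (List (String × String))), Dom_pos_populate_py pos_texts → Spec_pos_populate_py pos_texts (pos_populate_py pos_texts)

-- ===== LEMMAS AND PROOFS =====

lemma getD_setdefault_of_ne (d : PySem.Dict String (PySem.Dict String Int)) (w w' : String)
    (v d0 : PySem.Dict String Int) (h : w ≠ w') :
    (d.setdefault w' v).getD w d0 = d.getD w d0 := by
  rw [PySem.Dict.getD_eq_get?_getD, PySem.Dict.get?_setdefault_of_ne _ _ h,
    ← PySem.Dict.getD_eq_get?_getD]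

-- two inserts at distinct keys commute when the first key is already present
-- (its overwrite is in place, so insertion order is unaffected)
lemma insert_comm_of_contains_left {ν : Type} (I : PySem.Dict String ν) (p p' : String)
    (n m : ν) (hp : I.contains p = true) (hne : p' ≠ p) :
    (I.insert p n).insert p' m = (I.insert p' m).insert p n := by
  apply PySem.Dict.ext
  by_cases hc' : I.contains p' = true
  · rw [PySem.Dict.items_insert_of_contains _ _ (by simp [PySem.Dict.contains_insert, hc']),
      PySem.Dict.items_insert_of_contains _ _ hp,
      PySem.Dict.items_insert_of_contains _ _ (by simp [PySem.Dict.contains_insert, hp]),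
      PySem.Dict.items_insert_of_contains _ _ hc']
    simp only [List.map_map]
    apply List.map_congr_left
    intro q _
    simp only [Function.comp]
    by_cases h1 : q.1 = p
    · simp [h1, Ne.symm hne]
    · by_cases h2 : q.1 = p'
      · simp [h2, hne]
      · simp [h1, h2]
  · rw [Bool.not_eq_true] at hc'
    rw [PySem.Dict.items_insert_of_not_contains _ _
        (by simp [PySem.Dict.contains_insert, hc', hne]),
      PySem.Dict.items_insert_of_contains _ _ hp,
      PySem.Dict.items_insert_of_contains _ _ (by simp [PySem.Dict.contains_insert, hp]),
      PySem.Dict.items_insert_of_not_contains _ _ hc']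
    simp [hne]

-- A's step written via B's reshape step: A writes (old lookup + 1) at [word][pos]
lemma stepA_eq_stepR (X : PySem.Dict String (PySem.Dict String Int)) (w p : String) :
    pos_populate_step X (w, p)
      = pos_reshape_step X ((w, p), ((X.getD w PySem.Dict.empty).getD p 0 + 1)) := by
  unfold pos_populate_step pos_reshape_step
  by_cases hc : X.contains w = true
  · simp [hc, PySem.Dict.setdefault_of_contains _ _ hc]
  · rw [Bool.not_eq_true] at hc
    simp [hc, PySem.Dict.setdefault_of_not_contains _ _ hc,
      PySem.Dict.getD_of_not_contains _ _ hc, PySem.Dict.getD_insert_self,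
      PySem.Dict.getD_empty, PySem.Dict.insert_insert_self]

-- the reshape step keeps w (and p inside w) present
lemma pres_step (d : PySem.Dict String (PySem.Dict String Int)) (w p : String)
    (it : (String × String) × Int)
    (hw : d.contains w = true) (hp : (d.getD w PySem.Dict.empty).contains p = true) :
    (pos_reshape_step d it).contains w = true ∧
      ((pos_reshape_step d it).getD w PySem.Dict.empty).contains p = true := by
  obtain ⟨⟨w', p'⟩, n⟩ := it
  unfold pos_reshape_step
  simp only
  refine ⟨by simp [PySem.Dict.contains_insert, PySem.Dict.contains_setdefault, hw], ?_⟩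
  by_cases hww : w = w'
  · subst hww
    rw [PySem.Dict.getD_insert_self, PySem.Dict.contains_insert,
      PySem.Dict.getD_setdefault_self, hp]
    simp
  · rw [PySem.Dict.getD_insert_of_ne _ _ _ hww, getD_setdefault_of_ne _ _ _ _ _ hww]
    exact hp

-- a pure value overwrite at [w][p] (both present) commutes with a reshape step at another key
def posOverwrite (w p : String) (n : Int) (d : PySem.Dict String (PySem.Dict String Int)) :
    PySem.Dict String (PySem.Dict String Int) :=
  d.insert w ((d.getD w PySem.Dict.empty).insert p n)

lemma comm_step (d : PySem.Dict String (PySem.Dict String Int)) (w p : String) (n : Int)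
    (it : (String × String) × Int) (hne : it.1 ≠ (w, p))
    (hw : d.contains w = true) (hp : (d.getD w PySem.Dict.empty).contains p = true) :
    pos_reshape_step (posOverwrite w p n d) it = posOverwrite w p n (pos_reshape_step d it) := by
  obtain ⟨⟨w', p'⟩, m⟩ := it
  unfold pos_reshape_step posOverwrite
  simp only
  by_cases hww : w' = w
  · subst hww
    have hpp : p' ≠ p := by rintro rfl; exact hne rfl
    have hcontO : (d.insert w' ((d.getD w' PySem.Dict.empty).insert p n)).contains w' = true :=
      PySem.Dict.contains_insert_self _ _ _
    rw [PySem.Dict.setdefault_of_contains _ _ hcontO,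
        PySem.Dict.setdefault_of_contains _ _ hw]
    rw [PySem.Dict.getD_insert_self, PySem.Dict.getD_insert_self,
        PySem.Dict.insert_insert_self, PySem.Dict.insert_insert_self,
        insert_comm_of_contains_left _ _ _ _ _ hp hpp]
  · by_cases hcw : d.contains w' = true
    · have hcO : (d.insert w ((d.getD w PySem.Dict.empty).insert p n)).contains w' = true := by
        simp [PySem.Dict.contains_insert, hcw]
      rw [PySem.Dict.setdefault_of_contains _ _ hcO,
          PySem.Dict.setdefault_of_contains _ _ hcw,
          PySem.Dict.getD_insert_of_ne _ _ _ hww,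
          PySem.Dict.getD_insert_of_ne _ _ _ (Ne.symm hww),
          insert_comm_of_contains_left _ _ _ _ _ hw hww]
    · rw [Bool.not_eq_true] at hcw
      have hcO : (d.insert w ((d.getD w PySem.Dict.empty).insert p n)).contains w' = false := by
        simp [PySem.Dict.contains_insert, hcw, hww]
      rw [PySem.Dict.setdefault_of_not_contains _ _ hcO,
          PySem.Dict.setdefault_of_not_contains _ _ hcw,
          PySem.Dict.getD_insert_self, PySem.Dict.getD_insert_self,
          PySem.Dict.insert_insert_self, PySem.Dict.insert_insert_self,
          PySem.Dict.getD_insert_of_ne _ _ _ (Ne.symm hww),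
          insert_comm_of_contains_left _ _ _ _ _ hw hww]

lemma comm_foldl (its : List ((String × String) × Int)) (w p : String) (n : Int)
    (hq : (w, p) ∉ its.map (·.1)) :
    ∀ d : PySem.Dict String (PySem.Dict String Int), d.contains w = true →
      (d.getD w PySem.Dict.empty).contains p = true →
      its.foldl pos_reshape_step (posOverwrite w p n d)
        = posOverwrite w p n (its.foldl pos_reshape_step d) := by
  induction its with
  | nil => intro d _ _; rfl
  | cons it its ih =>
    intro d hw hp
    simp only [List.map_cons, List.mem_cons] at hq
    push Not at hq
    simp only [List.foldl_cons]
    rw [comm_step d w p n it (Ne.symm hq.1) hw hp]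
    exact ih hq.2 _ (pres_step d w p it hw hp).1 (pres_step d w p it hw hp).2

-- lookups through the reshape fold
lemma lookup_step_ne (pop : PySem.Dict String (PySem.Dict String Int)) (w p : String)
    (it : (String × String) × Int) (hne : it.1 ≠ (w, p)) :
    ((pos_reshape_step pop it).getD w PySem.Dict.empty).getD p 0
      = (pop.getD w PySem.Dict.empty).getD p 0 := by
  obtain ⟨⟨w', p'⟩, m⟩ := it
  unfold pos_reshape_step
  simp only
  by_cases hww : w = w'
  · subst hww
    have hpp : p ≠ p' := by rintro rfl; exact hne rfl
    rw [PySem.Dict.getD_insert_self, PySem.Dict.getD_insert_of_ne _ _ _ hpp,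
      PySem.Dict.getD_setdefault_self]
  · rw [PySem.Dict.getD_insert_of_ne _ _ _ hww, getD_setdefault_of_ne _ _ _ _ _ hww]

lemma lookup_foldR_not_mem (its : List ((String × String) × Int)) (w p : String)
    (hq : (w, p) ∉ its.map (·.1)) :
    ∀ pop : PySem.Dict String (PySem.Dict String Int),
      (((its.foldl pos_reshape_step pop).getD w PySem.Dict.empty).getD p 0)
        = ((pop.getD w PySem.Dict.empty).getD p 0) := by
  induction its with
  | nil => intro pop; rfl
  | cons it its ih =>
    intro pop
    simp only [List.map_cons, List.mem_cons] at hq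
    push Not at hq
    simp only [List.foldl_cons]
    rw [ih hq.2, lookup_step_ne pop w p it (Ne.symm hq.1)]

lemma lookup_foldR_mem (its : List ((String × String) × Int)) (w p : String) (n : Int)
    (hnd : (its.map (·.1)).Nodup) (hmem : ((w, p), n) ∈ its) :
    ∀ pop : PySem.Dict String (PySem.Dict String Int),
      (((its.foldl pos_reshape_step pop).getD w PySem.Dict.empty).getD p 0) = n := by
  induction its with
  | nil => cases hmem
  | cons it its ih =>
    intro pop
    simp only [List.map_cons, List.nodup_cons] at hnd
    rcases List.mem_cons.mp hmem with h | h
    · subst h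
      simp only [List.foldl_cons]
      rw [lookup_foldR_not_mem its w p hnd.1]
      unfold pos_reshape_step
      simp only
      rw [PySem.Dict.getD_insert_self, PySem.Dict.getD_insert_self]
    · have : it.1 ≠ (w, p) := by
        intro he
        exact hnd.1 (he ▸ List.mem_map.mpr ⟨_, h, rfl⟩)
      simp only [List.foldl_cons]
      exact ih hnd.2 h _

lemma pres_foldl (its : List ((String × String) × Int)) (w p : String) :
    ∀ d : PySem.Dict String (PySem.Dict String Int), d.contains w = true →
      (d.getD w PySem.Dict.empty).contains p = true →
      (its.foldl pos_reshape_step d).contains w = true ∧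
        ((its.foldl pos_reshape_step d).getD w PySem.Dict.empty).contains p = true := by
  induction its with
  | nil => intro d hw hp; exact ⟨hw, hp⟩
  | cons it its ih =>
    intro d hw hp
    exact ih _ (pres_step d w p it hw hp).1 (pres_step d w p it hw hp).2

lemma stepR_overwrite (pop : PySem.Dict String (PySem.Dict String Int)) (w p : String) (a b : Int) :
    pos_reshape_step pop ((w, p), b)
      = posOverwrite w p b (pos_reshape_step pop ((w, p), a)) := by
  unfold pos_reshape_step posOverwrite
  simp only
  rw [PySem.Dict.getD_insert_self, PySem.Dict.insert_insert_self,
    PySem.Dict.insert_insert_self]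

lemma overwrite_eq_stepR (X : PySem.Dict String (PySem.Dict String Int)) (w p : String) (n : Int)
    (hw : X.contains w = true) :
    posOverwrite w p n X = pos_reshape_step X ((w, p), n) := by
  unfold pos_reshape_step posOverwrite
  simp only
  rw [PySem.Dict.setdefault_of_contains _ _ hw]

-- A's nested loop is the fold over the flattened pair list
lemma foldA_flatten (texts : List (List (String × String)))
    (pop : PySem.Dict String (PySem.Dict String Int)) :
    texts.foldl (fun population text => text.foldl pos_populate_step population) pop
      = (texts.flatMap (fun t => t)).foldl pos_populate_step pop := by
  induction texts generalizing pop with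
  | nil => rfl
  | cons t ts ih => simp [List.flatMap_cons, List.foldl_append, ih]

-- the core: A's fold over the flat pair list equals B's reshape of the counter
lemma foldA_eq_reshape_counter (pairs : List (String × String)) :
    pairs.foldl pos_populate_step PySem.Dict.empty
      = (PySem.Dict.counter pairs).items.foldl pos_reshape_step PySem.Dict.empty := by
  induction pairs using List.reverseRecOn with
  | nil => rfl
  | append_singleton xs q ih =>
    obtain ⟨w, p⟩ := q
    rw [List.foldl_append, List.foldl_cons, List.foldl_nil, ih,
      PySem.Dict.counter_append_singleton]
    have hkeys : (PySem.Dict.counter xs).keys = (PySem.Dict.counter xs).items.map (·.1) := rfl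
    have hnd : ((PySem.Dict.counter xs).items.map (·.1)).Nodup := by
      rw [← hkeys]; exact PySem.Dict.nodup_keys_counter xs
    by_cases hc : (PySem.Dict.counter xs).contains (w, p) = true
    · -- (w,p) already counted: modify overwrites its value in place
      obtain ⟨old, hget⟩ : ∃ v, (PySem.Dict.counter xs).get? (w, p) = some v := by
        have := PySem.Dict.contains_eq_isSome_get? (d := PySem.Dict.counter xs) (k := (w, p))
        rw [hc] at this
        exact Option.isSome_iff_exists.mp this.symm
      have hgetD : (PySem.Dict.counter xs).getD (w, p) 0 = old :=
        PySem.Dict.getD_of_get?_eq_some _ _ hget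
      have hmem : ((w, p), old) ∈ (PySem.Dict.counter xs).items :=
        PySem.Dict.mem_items_of_get?_eq_some _ hget
      have hlk := lookup_foldR_mem _ w p old hnd hmem PySem.Dict.empty
      rw [stepA_eq_stepR, hlk]
      show _ = ((PySem.Dict.counter xs).insert (w, p)
          ((PySem.Dict.counter xs).getD (w, p) 0 + 1)).items.foldl pos_reshape_step PySem.Dict.empty
      rw [PySem.Dict.items_insert_of_contains _ _ hc, hgetD]
      obtain ⟨l1, l2, hsplit⟩ := List.append_of_mem hmem
      have hnd' := hsplit ▸ hnd
      rw [List.map_append, List.map_cons, List.nodup_append] at hnd'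
      have hql1 : (w, p) ∉ l1.map (·.1) := fun hin =>
        hnd'.2.2 (w, p) hin (w, p) (by simp) rfl
      have hql2 : (w, p) ∉ l2.map (·.1) := by
        have := List.nodup_cons.mp hnd'.2.1
        simpa using this.1
      have hmap : ((l1 ++ ((w, p), old) :: l2).map
          (fun q' => if q'.1 == (w, p) then ((w, p), old + 1) else q'))
          = l1 ++ ((w, p), old + 1) :: l2 := by
        simp only [List.map_append, List.map_cons, BEq.rfl]
        congr 1
        · have h1 : ∀ q' ∈ l1, (if (q'.1 == (w, p)) = true then ((w, p), old + 1) else q') = id q' := by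
            intro q' hq'
            have : q'.1 ≠ (w, p) := fun he => hql1 (he ▸ List.mem_map.mpr ⟨_, hq', rfl⟩)
            simp [this]
          rw [List.map_congr_left h1, List.map_id]
        · congr 1
          have h2 : ∀ q' ∈ l2, (if (q'.1 == (w, p)) = true then ((w, p), old + 1) else q') = id q' := by
            intro q' hq'
            have : q'.1 ≠ (w, p) := fun he => hql2 (he ▸ List.mem_map.mpr ⟨_, hq', rfl⟩)
            simp [this]
          rw [List.map_congr_left h2, List.map_id]
      rw [hsplit, hmap, List.foldl_append, List.foldl_append, List.foldl_cons, List.foldl_cons]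
      -- both sides now fold l2 after a (w,p)-write; commute the final overwrite in
      set pop := l1.foldl pos_reshape_step PySem.Dict.empty with hpop
      have hd0w : (pos_reshape_step pop ((w, p), old)).contains w = true := by
        unfold pos_reshape_step; simp only
        exact PySem.Dict.contains_insert_self _ _ _
      have hd0p : ((pos_reshape_step pop ((w, p), old)).getD w
          PySem.Dict.empty).contains p = true := by
        unfold pos_reshape_step; simp only
        rw [PySem.Dict.getD_insert_self]
        exact PySem.Dict.contains_insert_self _ _ _
      rw [stepR_overwrite pop w p old (old + 1),
        comm_foldl l2 w p (old + 1) hql2 _ hd0w hd0p,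
        overwrite_eq_stepR _ _ _ _ (pres_foldl l2 w p _ hd0w hd0p).1]
    · -- fresh pair: modify appends ((w,p),1) at the end
      rw [Bool.not_eq_true] at hc
      have hq : (w, p) ∉ (PySem.Dict.counter xs).items.map (·.1) := by
        rw [← hkeys]
        intro hin
        rw [((PySem.Dict.contains_iff_mem_keys _ _).mpr hin : _)] at hc
        cases hc
      have hlk := lookup_foldR_not_mem _ w p hq PySem.Dict.empty
      rw [stepA_eq_stepR, hlk]
      show _ = ((PySem.Dict.counter xs).insert (w, p)
          ((PySem.Dict.counter xs).getD (w, p) 0 + 1)).items.foldl pos_reshape_step PySem.Dict.empty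
      rw [PySem.Dict.items_insert_of_not_contains _ _ hc,
        PySem.Dict.getD_of_not_contains _ _ hc, List.foldl_append, List.foldl_cons,
        List.foldl_nil]
      rfl

-- ===== VERDICT (by name: the statement is the Claim_ definition above) =====
theorem pos_populate_py_spec : Claim_equal_pos_populate_py := by
  intro pos_texts _
  unfold Spec_pos_populate_py pos_populate_py pos_populate_py_alt
  rw [foldA_flatten, foldA_eq_reshape_counter]
  rfl
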